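-- pv_equiv track=rewrite | github.com/Hahonine/FlyRoboticsUSAWebsite | static/python/utility.py | getActive
-- ===== SOURCE A (Python) =====
-- def getActive(menu_list, item_active, item_str, active_str):
--     menu_dict = []
--
--     for i in range(0,len(menu_list)):
--         item = menu_list[i]
--         if i == item_active-1:
--             item["liclass"] = active_str
--         else:
--             item["liclass"] = item_str
--         menu_dict.append(item)
--     return menu_dict
-- ===== SOURCE B (Python) =====
-- def getActive(menu_list, item_active, item_str, active_str):
--     # Recursive decomposition: walk the list with a countdown counter instead of
--     # an index loop; the head is active exactly when the counter hits zero.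
--     def go(items, k):
--         if not items:
--             return []
--         head, rest = items[0], items[1:]
--         head["liclass"] = active_str if k == 0 else item_str
--         return [head] + go(rest, k - 1)
--     return go(menu_list, item_active - 1)
-- ===== Notes on version B (the rewrite author's own statement) =====
-- stated objective: alternative
-- what changed: Replaces A's index loop over range(len) with append-and-compare-index by a structural recursion over the list carrying a countdown counter that marks the active element when it reaches zero.
import Mathlib
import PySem

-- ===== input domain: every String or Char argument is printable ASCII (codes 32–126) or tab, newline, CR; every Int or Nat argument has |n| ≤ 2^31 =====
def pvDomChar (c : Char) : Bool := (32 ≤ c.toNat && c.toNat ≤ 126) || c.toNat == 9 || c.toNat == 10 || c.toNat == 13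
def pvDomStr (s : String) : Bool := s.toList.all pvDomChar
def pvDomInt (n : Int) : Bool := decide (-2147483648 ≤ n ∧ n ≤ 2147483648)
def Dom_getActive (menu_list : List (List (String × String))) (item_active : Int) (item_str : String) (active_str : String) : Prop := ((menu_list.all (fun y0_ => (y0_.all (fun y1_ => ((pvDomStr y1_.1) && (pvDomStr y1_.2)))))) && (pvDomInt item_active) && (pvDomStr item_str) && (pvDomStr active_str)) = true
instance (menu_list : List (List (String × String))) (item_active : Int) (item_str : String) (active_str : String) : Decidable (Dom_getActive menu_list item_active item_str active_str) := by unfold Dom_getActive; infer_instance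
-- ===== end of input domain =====

-- B replaces A's index loop by a structural recursion with a countdown counter (alternative decomposition, no speed claim); equivalence is about return values (both mutate the items identically).


-- ===== PORT A =====
-- Python dict assignment d["liclass"] = v on an insertion-ordered association list:
-- overwrite the first matching key in place, append a new pair otherwise (exact Python dict semantics).
def setKey (item : List (String × String)) (k v : String) : List (String × String) :=
  match item with
  | [] => [(k, v)]
  | (k', v') :: rest => if k' == k then (k', v) :: rest else (k', v') :: setKey rest k v

def getActive (menu_list : List (List (String × String))) (item_active : Int) (item_str : String) (active_str : String) : List (List (String × String)) :=
  (PySem.List.pyRange 0 menu_list.length 1).foldl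
    (fun menu_dict i =>
      let item := PySem.List.pyGetD menu_list i []
      if i == item_active - 1 then
        menu_dict ++ [setKey item "liclass" active_str]
      else
        menu_dict ++ [setKey item "liclass" item_str])
    []

-- ===== PORT B =====
-- B's recursive helper 'go': head gets the active class exactly when the countdown k is 0.
def goAlt (items : List (List (String × String))) (k : Int) (item_str active_str : String) : List (List (String × String)) :=
  match items with
  | [] => []
  | head :: rest =>
      setKey head "liclass" (if k == 0 then active_str else item_str) :: goAlt rest (k - 1) item_str active_str

def getActive_alt (menu_list : List (List (String × String))) (item_active : Int) (item_str : String) (active_str : String) : List (List (String × String)) :=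
  goAlt menu_list (item_active - 1) item_str active_str

-- ===== PRECONDITION & SPEC =====
def Spec_getActive (menu_list : List (List (String × String))) (item_active : Int) (item_str : String) (active_str : String) (out : List (List (String × String))) : Prop := out = getActive_alt menu_list item_active item_str active_str
instance (menu_list : List (List (String × String))) (item_active : Int) (item_str : String) (active_str : String) (out : List (List (String × String))) : Decidable (Spec_getActive menu_list item_active item_str active_str out) := by unfold Spec_getActive; infer_instance

-- ===== CLAIM (what is proved, stated in full; the proofs are below) =====
def Claim_equal_getActive : Prop := ∀ (menu_list : List (List (String × String))) (item_active : Int) (item_str : String) (active_str : String), Dom_getActive menu_list item_active item_str active_str → Spec_getActive menu_list item_active item_str active_str (getActive menu_list item_active item_str active_str)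

-- ===== LEMMAS AND PROOFS =====

-- A's loop is a map over range(len): each iteration appends exactly one element.
theorem getActive_eq_map (ml : List (List (String × String))) (ia : Int) (istr astr : String) :
    getActive ml ia istr astr =
      (PySem.List.pyRange 0 ml.length 1).map
        (fun i => if i == ia - 1 then setKey (PySem.List.pyGetD ml i []) "liclass" astr
                  else setKey (PySem.List.pyGetD ml i []) "liclass" istr) := by
  unfold getActive
  have h := PySem.List.foldl_append_singleton_eq_map
      (f := fun i => if i == ia - 1 then setKey (PySem.List.pyGetD ml i []) "liclass" astr
                     else setKey (PySem.List.pyGetD ml i []) "liclass" istr)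
      (l := PySem.List.pyRange 0 ml.length 1) (acc := [])
  rw [show (fun (menu_dict : List (List (String × String))) (i : Int) =>
        let item := PySem.List.pyGetD ml i []
        if i == ia - 1 then menu_dict ++ [setKey item "liclass" astr]
        else menu_dict ++ [setKey item "liclass" istr]) =
      (fun (acc : List (List (String × String))) (i : Int) =>
        acc ++ [if i == ia - 1 then setKey (PySem.List.pyGetD ml i []) "liclass" astr
                else setKey (PySem.List.pyGetD ml i []) "liclass" istr]) from by
    funext acc i; by_cases h : i == ia - 1 <;> simp [h]]
  simpa using h

theorem goAlt_length (ml : List (List (String × String))) (k : Int) (istr astr : String) :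
    (goAlt ml k istr astr).length = ml.length := by
  induction ml generalizing k with
  | nil => simp [goAlt]
  | cons h t ih => simp [goAlt, ih]

theorem goAlt_getElem (ml : List (List (String × String))) (k : Int) (istr astr : String)
    (j : Nat) (hj : j < ml.length) (hj' : j < (goAlt ml k istr astr).length) :
    (goAlt ml k istr astr)[j] =
      setKey ml[j] "liclass" (if (j : Int) == k then astr else istr) := by
  induction ml generalizing k j with
  | nil => simp at hj
  | cons h t ih =>
    cases j with
    | zero => simp [goAlt, BEq.comm (a := (0:Int)) (b := k)]
    | succ m =>
      have hm : m < t.length := by simpa using hj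
      have hm' : m < (goAlt t (k-1) istr astr).length := by rw [goAlt_length]; exact hm
      have := ih (k - 1) m hm hm'
      simp only [goAlt, List.getElem_cons_succ, this]
      congr 1
      have : ((m : Int) == k - 1) = (((m + 1 : Nat) : Int) == k) := by
        by_cases hc : (m : Int) = k - 1
        · have h2 : ((m + 1 : Nat) : Int) = k := by push_cast; omega
          simp [hc, h2]
        · have h2 : ¬ ((m : Int) + 1 = k) := by omega
          simp [hc, h2]
      rw [this]

-- ===== VERDICT (by name: the statement is the Claim_ definition above) =====
theorem getActive_spec : Claim_equal_getActive := by
  intro ml ia istr astr _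
  unfold Spec_getActive getActive_alt
  rw [getActive_eq_map]
  apply List.ext_getElem
  · simp [PySem.List.length_pyRange_one, goAlt_length]
  · intro j hj hj'
    simp only [List.length_map, PySem.List.length_pyRange_one] at hj
    have hjn : j < ml.length := by omega
    rw [List.getElem_map, PySem.List.getElem_pyRange_one,
        goAlt_getElem ml (ia - 1) istr astr j hjn hj']
    have hget : PySem.List.pyGetD ml ((0 : Int) + (j : Int)) [] = ml[j] := by
      rw [show ((0:Int) + (j:Int)) = (j : Int) by ring]
      simp [PySem.List.pyGetD_natCast, List.getD_eq_getElem?_getD, hjn]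
    by_cases he : (j : Int) = ia - 1
    · have h1 : ((0:Int) + (j:Int)) == ia - 1 := by simp; omega
      have h2 : ((j:Int) == ia - 1) = true := by simp [he]
      rw [if_pos h1, h2, if_pos rfl, hget]
    · have h1 : ¬ ((0:Int) + (j:Int)) == ia - 1 := by simp; omega
      have h2 : ((j:Int) == ia - 1) = false := by simp [he]
      rw [if_neg h1, h2, if_neg (by simp), hget]
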